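-- pv_equiv track=rewrite | github.com/DNYoussef/AIVillage | scripts/bayesrag_wikipedia_ingestion.py | _split_by_sections
-- ===== SOURCE A (Python) =====
-- from typing import Any, Dict, List, Optional, Set, Tuple
--
-- def _split_by_sections(content: str) -> List[Tuple[str, str]]:
--     """Split content by Wikipedia sections."""
--     sections = []
--
--     # Look for == Section == patterns
--     lines = content.split("\n")
--     current_section = "Introduction"
--     current_content = []
--
--     for line in lines:
--         if line.startswith("==") and line.endswith("=="):
--             # Save previous section
--             if current_content:
--                 sections.append((current_section, "\n".join(current_content)))
--
--             # Start new section
--             current_section = line.strip("= ")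
--             current_content = []
--         else:
--             current_content.append(line)
--
--     # Add final section
--     if current_content:
--         sections.append((current_section, "\n".join(current_content)))
--
--     return sections
-- ===== SOURCE B (Python) =====
-- from typing import List, Tuple
--
-- def _split_by_sections(content: str) -> List[Tuple[str, str]]:
--     """Span-based splitter: repeatedly take the run of non-header lines, then the header."""
--     lines = content.split("\n")
--
--     def is_header(line: str) -> bool:
--         return line.startswith("==") and line.endswith("==")
--
--     sections: List[Tuple[str, str]] = []
--     label = "Introduction"
--     i = 0
--     n = len(lines)
--     while i < n:
--         j = i
--         while j < n and not is_header(lines[j]):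
--             j += 1
--         if j > i:
--             sections.append((label, "\n".join(lines[i:j])))
--         if j < n:
--             label = lines[j].strip("= ")
--         i = j + 1
--     return sections
-- ===== Notes on version B (the rewrite author's own statement) =====
-- stated objective: alternative
-- what changed: A folds over the lines carrying a (current section, pending buffer, output) state; B instead repeatedly spans the maximal run of non-header lines, emits it under the current label, then consumes the header line to get the next label.
import Mathlib
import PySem

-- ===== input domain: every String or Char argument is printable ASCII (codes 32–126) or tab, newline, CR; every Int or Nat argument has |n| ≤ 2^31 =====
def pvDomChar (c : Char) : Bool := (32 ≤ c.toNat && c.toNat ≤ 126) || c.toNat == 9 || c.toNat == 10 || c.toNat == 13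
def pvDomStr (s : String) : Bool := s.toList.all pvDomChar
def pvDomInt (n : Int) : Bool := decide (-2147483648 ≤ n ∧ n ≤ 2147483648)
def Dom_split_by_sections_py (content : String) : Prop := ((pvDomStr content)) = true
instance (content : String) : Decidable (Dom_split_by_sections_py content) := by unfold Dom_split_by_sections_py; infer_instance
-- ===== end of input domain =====

-- B replaces A's single fold carrying a (section, buffer, output) state by a span-based
-- recursion (take the run of non-header lines, emit it, consume the header); objective: alternative.

-- ===== PORT A =====
def split_by_sections_py (content : String) : List (String × String) :=
  let lines := (PySem.Chars.splitOn content.toList ['\n']).map String.ofList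
  let st := lines.foldl
    (fun (st : String × List String × List (String × String)) line =>
      match st with
      | (sec, cur, secs) =>
        if PySem.Str.startswith line "==" && PySem.Str.endswith line "==" then
          (PySem.Str.stripChars line "= ", [],
           if cur = [] then secs else secs ++ [(sec, PySem.Str.join "\n" cur)])
        else (sec, cur ++ [line], secs))
    ("Introduction", [], [])
  match st with
  | (sec, cur, secs) =>
    if cur = [] then secs else secs ++ [(sec, PySem.Str.join "\n" cur)]

-- ===== PORT B =====
def pvIsHeader (line : String) : Bool :=
  PySem.Str.startswith line "==" && PySem.Str.endswith line "=="

def pvEmit (label : String) (body : List String) : List (String × String) :=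
  if body = [] then [] else [(label, PySem.Str.join "\n" body)]

def pvGo (label : String) (lines : List String) : List (String × String) :=
  let body := lines.takeWhile (fun l => !pvIsHeader l)
  let rest := lines.dropWhile (fun l => !pvIsHeader l)
  match _h : rest with
  | [] => pvEmit label body
  | hd :: t =>
      pvEmit label body ++ pvGo (PySem.Str.stripChars hd "= ") t
  termination_by lines.length
  decreasing_by
    have h1 : rest.length ≤ lines.length := List.length_dropWhile_le _ _
    have h2 : rest.length = t.length + 1 := by rw [_h]; simp
    omega

def split_by_sections_py_alt (content : String) : List (String × String) :=
  pvGo "Introduction" ((PySem.Chars.splitOn content.toList ['\n']).map String.ofList)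

-- ===== PRECONDITION & SPEC =====
def Spec_split_by_sections_py (content : String) (out : List (String × String)) : Prop := out = split_by_sections_py_alt content
instance (content : String) (out : List (String × String)) : Decidable (Spec_split_by_sections_py content out) := by unfold Spec_split_by_sections_py; infer_instance

-- ===== CLAIM (what is proved, stated in full; the proofs are below) =====
def Claim_equal_split_by_sections_py : Prop := ∀ (content : String), Dom_split_by_sections_py content → Spec_split_by_sections_py content (split_by_sections_py content)

-- ===== LEMMAS AND PROOFS =====

-- A's fold, reformulated as structural recursion carrying the pending buffer.
def pvGoAux (sec : String) (cur : List String) (lines : List String) : List (String × String) :=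
  match lines with
  | [] => pvEmit sec cur
  | l :: t =>
    if pvIsHeader l then pvEmit sec cur ++ pvGoAux (PySem.Str.stripChars l "= ") [] t
    else pvGoAux sec (cur ++ [l]) t

def pvStep (st : String × List String × List (String × String)) (line : String) :
    String × List String × List (String × String) :=
  match st with
  | (sec, cur, secs) =>
    if PySem.Str.startswith line "==" && PySem.Str.endswith line "==" then
      (PySem.Str.stripChars line "= ", [],
       if cur = [] then secs else secs ++ [(sec, PySem.Str.join "\n" cur)])
    else (sec, cur ++ [line], secs)

def pvFinish (st : String × List String × List (String × String)) : List (String × String) :=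
  match st with
  | (sec, cur, secs) =>
    if cur = [] then secs else secs ++ [(sec, PySem.Str.join "\n" cur)]

lemma pvFoldl_eq_goAux (lines : List String) :
    ∀ (sec : String) (cur : List String) (secs : List (String × String)),
      pvFinish (lines.foldl pvStep (sec, cur, secs)) = secs ++ pvGoAux sec cur lines := by
  induction lines with
  | nil =>
    intro sec cur secs
    simp [pvFinish, pvGoAux, pvEmit]
    split <;> simp
  | cons l t ih =>
    intro sec cur secs
    simp only [List.foldl_cons, pvGoAux]
    by_cases h : pvIsHeader l = true
    · have hs : pvStep (sec, cur, secs) l =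
        (PySem.Str.stripChars l "= ", [],
         if cur = [] then secs else secs ++ [(sec, PySem.Str.join "\n" cur)]) := by
        simp [pvStep, pvIsHeader] at h ⊢
        simp [h]
      rw [hs, ih, h]
      simp only [pvEmit]
      split <;> simp
    · have hs : pvStep (sec, cur, secs) l = (sec, cur ++ [l], secs) := by
        simp [pvStep, pvIsHeader] at h ⊢
        tauto
      rw [hs, ih]
      simp [h]

lemma pvGoAux_span (lines : List String) :
    ∀ (sec : String) (cur : List String),
      pvGoAux sec cur lines =
        pvGoAux sec (cur ++ lines.takeWhile (fun l => !pvIsHeader l))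
          (lines.dropWhile (fun l => !pvIsHeader l)) := by
  induction lines with
  | nil => intro sec cur; simp
  | cons l t ih =>
    intro sec cur
    by_cases h : pvIsHeader l = true
    · simp [h]
    · have h' : pvIsHeader l = false := by simpa using h
      simp only [List.takeWhile_cons, List.dropWhile_cons, h', Bool.not_false, if_pos,
        pvGoAux]
      rw [ih sec (cur ++ [l])]
      simp

lemma pvDropWhile_head (p : String → Bool) :
    ∀ (l : List String) (x : String) (xs : List String),
      l.dropWhile p = x :: xs → p x = false := by
  intro l
  induction l with
  | nil => intro x xs h; simp at h
  | cons a t ih =>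
    intro x xs h
    by_cases ha : p a = true
    · rw [List.dropWhile_cons, if_pos ha] at h; exact ih x xs h
    · rw [List.dropWhile_cons, if_neg ha] at h
      cases h; simpa using ha

lemma pvGo_eq_goAux (lines : List String) : ∀ sec, pvGo sec lines = pvGoAux sec [] lines := by
  induction hn : lines.length using Nat.strong_induction_on generalizing lines with
  | _ n ih =>
    intro sec
    rw [pvGo]
    split
    · next heq =>
      rw [pvGoAux_span lines sec [], heq]
      simp [pvGoAux]
    · next hd t heq =>
      rw [pvGoAux_span lines sec [], heq]
      have hhd : pvIsHeader hd = true := by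
        have := pvDropWhile_head _ lines hd t heq
        simpa using this
      have hlt : t.length < lines.length := by
        have h1 : (lines.dropWhile (fun l => !pvIsHeader l)).length ≤ lines.length :=
          List.length_dropWhile_le _ _
        rw [heq] at h1; simp at h1; omega
      rw [pvGoAux, if_pos hhd, List.nil_append,
        ih t.length (by omega) t rfl (PySem.Str.stripChars hd "= ")]

-- ===== VERDICT (by name: the statement is the Claim_ definition above) =====
theorem split_by_sections_py_spec : Claim_equal_split_by_sections_py := by
  intro content _
  show split_by_sections_py content = split_by_sections_py_alt content
  unfold split_by_sections_py split_by_sections_py_alt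
  rw [pvGo_eq_goAux]
  show pvFinish (List.foldl pvStep ("Introduction", [], [])
      ((PySem.Chars.splitOn content.toList ['\n']).map String.ofList)) = _
  rw [pvFoldl_eq_goAux]
  simp
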